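-- pv_equiv track=rewrite | github.com/skalingclouds/Multi-Agent-Custom-Automation-Engine-Solution-Accelerator | src/leadgen/utils/dossier_template.py | _format_operating_hours
-- ===== SOURCE A (Python) =====
-- from typing import Any, Dict, List, Optional
--
-- def _format_operating_hours(hours: Optional[Dict[str, str]]) -> str:
--     """Format operating hours as a readable string.
--
--     Args:
--         hours: Dictionary mapping day names to hours.
--
--     Returns:
--         Formatted hours string.
--     """
--     if not hours:
--         return "Not available"
--
--     days_order = ["Monday", "Tuesday", "Wednesday", "Thursday", "Friday", "Saturday", "Sunday"]
--     lines = []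
--
--     for day in days_order:
--         if day in hours:
--             lines.append(f"  - {day}: {hours[day]}")
--
--     # Handle any non-standard day keys
--     for day, time in hours.items():
--         if day not in days_order:
--             lines.append(f"  - {day}: {time}")
--
--     return "\n".join(lines) if lines else "Not available"
-- ===== SOURCE B (Python) =====
-- def _format_operating_hours(hours):
--     """Format operating hours as a readable string (stable-sort formulation)."""
--     if not hours:
--         return "Not available"
--
--     days_order = ["Monday", "Tuesday", "Wednesday", "Thursday", "Friday", "Saturday", "Sunday"]
--     rank = {day: i for i, day in enumerate(days_order)}
--     lines = [
--         f"  - {day}: {time}"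
--         for day, time in sorted(hours.items(), key=lambda kv: rank.get(kv[0], len(days_order)))
--     ]
--     return "\n".join(lines)
-- ===== Notes on version B (the rewrite author's own statement) =====
-- stated objective: alternative
-- what changed: Replaces A's two membership-scanning passes (one over days_order with dict lookups, one over items filtering non-standard keys) by a single stable sort of hours.items() under a precomputed day->rank map (non-standard keys all get rank 7, so the stable sort preserves their insertion order); Pre_ excludes association lists with duplicate keys, which represent no Python dict (dict keys are unique).
import Mathlib
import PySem

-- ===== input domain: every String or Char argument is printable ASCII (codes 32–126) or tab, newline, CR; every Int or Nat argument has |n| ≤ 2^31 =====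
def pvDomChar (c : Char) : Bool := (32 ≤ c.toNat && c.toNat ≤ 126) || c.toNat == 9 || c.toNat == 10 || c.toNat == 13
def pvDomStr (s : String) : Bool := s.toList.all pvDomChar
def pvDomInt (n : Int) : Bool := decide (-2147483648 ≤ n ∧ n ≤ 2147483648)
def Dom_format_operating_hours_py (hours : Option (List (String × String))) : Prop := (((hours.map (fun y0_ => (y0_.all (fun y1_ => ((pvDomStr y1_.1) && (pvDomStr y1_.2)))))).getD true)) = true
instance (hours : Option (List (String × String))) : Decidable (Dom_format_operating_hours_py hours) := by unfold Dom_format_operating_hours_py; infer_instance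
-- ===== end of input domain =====

-- B replaces A's two membership-scanning passes by one stable sort of the items under a
-- precomputed day→rank map (alternative decomposition, not claimed faster).

-- ===== PORT A =====
def pvDaysA : List String := ["Monday", "Tuesday", "Wednesday", "Thursday", "Friday", "Saturday", "Sunday"]

def pvFmtA (kv : String × String) : String := "  - " ++ kv.1 ++ ": " ++ kv.2

def format_operating_hours_py (hours : Option (List (String × String))) : String :=
  match hours with
  | none => "Not available"                   -- `if not hours` (None)
  | some items =>
    if items.isEmpty then "Not available"     -- `if not hours` (empty dict)
    else
      let d : PySem.Dict String String := PySem.Dict.mk items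
      -- first loop: standard days in weekday order (`day in hours` + `hours[day]` = get?)
      let lines1 := pvDaysA.foldl (fun acc day =>
        match PySem.Dict.get? d day with
        | some t => acc ++ [pvFmtA (day, t)]
        | none => acc) []
      -- second loop: non-standard keys in insertion order
      let lines := items.foldl (fun acc kv =>
        if pvDaysA.contains kv.1 then acc else acc ++ [pvFmtA kv]) lines1
      if lines.isEmpty then "Not available" else PySem.Str.join "\n" lines

-- ===== PORT B =====
def pvDaysB : List String := ["Monday", "Tuesday", "Wednesday", "Thursday", "Friday", "Saturday", "Sunday"]

def pvFmtB (kv : String × String) : String := "  - " ++ kv.1 ++ ": " ++ kv.2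

-- rank = {day: i for i, day in enumerate(days_order)}
def pvRankB : PySem.Dict String Int :=
  (PySem.List.enumerate pvDaysB 0).foldl (fun d p => PySem.Dict.insert d p.2 p.1) PySem.Dict.empty

def format_operating_hours_py_alt (hours : Option (List (String × String))) : String :=
  match hours with
  | none => "Not available"
  | some items =>
    if items.isEmpty then "Not available"
    else
      -- sorted(hours.items(), key=lambda kv: rank.get(kv[0], len(days_order))) — stable sort
      let lines := (PySem.List.sorted items
        (fun kv => PySem.Dict.getD pvRankB kv.1 ((pvDaysB.length : Int)))).map pvFmtB
      PySem.Str.join "\n" lines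

-- ===== PRECONDITION & SPEC =====
-- Pre_ excludes association lists with a repeated key: they encode no Python dict (dict keys
-- are unique), so A's behaviour on them is not the behaviour of any Python call.
def Pre_format_operating_hours_py (hours : Option (List (String × String))) : Prop :=
  ((hours.getD []).map Prod.fst).Nodup

instance (hours : Option (List (String × String))) : Decidable (Pre_format_operating_hours_py hours) := by
  unfold Pre_format_operating_hours_py; infer_instance

def pvWitness_format_operating_hours_py : (Option (List (String × String))) :=
  some [("Monday", "9am-5pm"), ("Holidays", "closed")]

def Spec_format_operating_hours_py (hours : Option (List (String × String))) (out : String) : Prop := out = format_operating_hours_py_alt hours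
instance (hours : Option (List (String × String))) (out : String) : Decidable (Spec_format_operating_hours_py hours out) := by unfold Spec_format_operating_hours_py; infer_instance

-- ===== CLAIM (what is proved, stated in full; the proofs are below) =====
def Claim_equal_format_operating_hours_py : Prop := ∀ (hours : Option (List (String × String))), Dom_format_operating_hours_py hours → Pre_format_operating_hours_py hours → Spec_format_operating_hours_py hours (format_operating_hours_py hours)

-- ===== LEMMAS AND PROOFS =====

-- B's sort key, named for the proofs (definitionally the key the port passes to `sorted`)
def pvKeyB (s : String) : Int := PySem.Dict.getD pvRankB s ((pvDaysB.length : Int))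

lemma pvRankB_eq : pvRankB = PySem.Dict.mk
    [("Monday", 0), ("Tuesday", 1), ("Wednesday", 2), ("Thursday", 3),
     ("Friday", 4), ("Saturday", 5), ("Sunday", 6)] := by decide

lemma pvKeyB_eq (s : String) : pvKeyB s =
    (if s = "Monday" then 0 else if s = "Tuesday" then 1 else if s = "Wednesday" then 2
     else if s = "Thursday" then 3 else if s = "Friday" then 4 else if s = "Saturday" then 5
     else if s = "Sunday" then 6 else 7) := by
  rw [pvKeyB, pvRankB_eq]
  simp only [PySem.Dict.getD_eq_get?_getD, PySem.Dict.get?_mk_cons]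
  simp only [pvDaysB, PySem.Dict.get?, List.length_cons, List.length_nil]
  split_ifs <;> simp_all

lemma pvKey_mem (s : String) : pvKeyB s ∈ ([0, 1, 2, 3, 4, 5, 6, 7] : List Int) := by
  rw [pvKeyB_eq]; split_ifs <;> simp

lemma pvKey_b0 (s : String) : decide (pvKeyB s = 0) = (s == "Monday") := by
  rw [pvKeyB_eq]; split_ifs <;> simp_all
lemma pvKey_b1 (s : String) : decide (pvKeyB s = 1) = (s == "Tuesday") := by
  rw [pvKeyB_eq]; split_ifs <;> simp_all
lemma pvKey_b2 (s : String) : decide (pvKeyB s = 2) = (s == "Wednesday") := by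
  rw [pvKeyB_eq]; split_ifs <;> simp_all
lemma pvKey_b3 (s : String) : decide (pvKeyB s = 3) = (s == "Thursday") := by
  rw [pvKeyB_eq]; split_ifs <;> simp_all
lemma pvKey_b4 (s : String) : decide (pvKeyB s = 4) = (s == "Friday") := by
  rw [pvKeyB_eq]; split_ifs <;> simp_all
lemma pvKey_b5 (s : String) : decide (pvKeyB s = 5) = (s == "Saturday") := by
  rw [pvKeyB_eq]; split_ifs <;> simp_all
lemma pvKey_b6 (s : String) : decide (pvKeyB s = 6) = (s == "Sunday") := by
  rw [pvKeyB_eq]; split_ifs <;> simp_all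
lemma pvKey_b7 (s : String) : decide (pvKeyB s = 7) = !pvDaysA.contains s := by
  rw [pvKeyB_eq]; split_ifs <;> simp_all [pvDaysA]

-- stability: inserting x into A ++ B where A's keys are ≤ key x and B's are > key x lands between
lemma pvInsertBy_split {α κ : Type} [LinearOrder κ] (key : α → κ) (x : α) (A B : List α)
    (hA : ∀ a ∈ A, ¬ key x < key a) (hB : ∀ b ∈ B, key x < key b) :
    PySem.List.insertBy (fun a b => decide (key a < key b)) x (A ++ B) = A ++ x :: B := by
  induction A with
  | nil =>
    cases B with
    | nil => rfl
    | cons b bs => simp [PySem.List.insertBy, hB b (List.mem_cons_self)]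
  | cons a A ih =>
    simp only [List.cons_append, PySem.List.insertBy]
    rw [if_neg (by simpa using hA a List.mem_cons_self)]
    simp [ih (fun a ha => hA a (List.mem_cons_of_mem _ ha))]

lemma pvInsert_step {α κ : Type} [LinearOrder κ] (key : α → κ) (is : List κ)
    (hs : is.Pairwise (· < ·)) (x : α) (hx : key x ∈ is) (l : List α) :
    PySem.List.insertBy (fun a b => decide (key a < key b)) x
      (is.flatMap (fun i => l.filter (fun e => decide (key e = i)))) =
    is.flatMap (fun i => (l ++ [x]).filter (fun e => decide (key e = i))) := by
  obtain ⟨is₁, is₂, rfl⟩ := List.append_of_mem hx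
  rw [List.pairwise_append] at hs
  obtain ⟨hs₁, hs₂, hmid⟩ := hs
  have h1 : ∀ i ∈ is₁, i < key x := fun i hi => hmid i hi _ (List.mem_cons_self)
  have h2 : ∀ i ∈ is₂, key x < i := fun i hi => (List.pairwise_cons.1 hs₂).1 i hi
  have hfl : ∀ (is' : List κ), (∀ i ∈ is', i ≠ key x) →
      is'.flatMap (fun i => (l ++ [x]).filter (fun e => decide (key e = i))) =
      is'.flatMap (fun i => l.filter (fun e => decide (key e = i))) := by
    intro is' hne
    induction is' with
    | nil => rfl
    | cons j js ih =>
      simp only [List.flatMap_cons]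
      rw [ih (fun i hi => hne i (List.mem_cons_of_mem _ hi))]
      simp [List.filter_append, Ne.symm (hne j List.mem_cons_self)]
  rw [List.flatMap_append, List.flatMap_cons]
  have lhs : is₁.flatMap (fun i => l.filter (fun e => decide (key e = i))) ++
      (l.filter (fun e => decide (key e = key x)) ++
        is₂.flatMap (fun i => l.filter (fun e => decide (key e = i)))) =
      (is₁.flatMap (fun i => l.filter (fun e => decide (key e = i))) ++
        l.filter (fun e => decide (key e = key x))) ++
      is₂.flatMap (fun i => l.filter (fun e => decide (key e = i))) := by
    simp [List.append_assoc]
  rw [lhs, pvInsertBy_split key x _ _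
    (by
      intro a ha
      rcases List.mem_append.1 ha with ha | ha
      · obtain ⟨i, hi, hai⟩ := List.mem_flatMap.1 ha
        have := of_decide_eq_true (List.mem_filter.1 hai).2
        exact fun hlt => absurd (h1 i hi) (by rw [← this]; exact fun h' => lt_asymm hlt h')
      · have := of_decide_eq_true (List.mem_filter.1 ha).2
        simp [this])
    (by
      intro b hb
      obtain ⟨i, hi, hbi⟩ := List.mem_flatMap.1 hb
      have := of_decide_eq_true (List.mem_filter.1 hbi).2
      rw [this]; exact h2 i hi)]
  rw [List.flatMap_append, List.flatMap_cons,
    hfl is₁ (fun i hi => ne_of_lt (h1 i hi)),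
    hfl is₂ (fun i hi => (ne_of_lt (h2 i hi)).symm)]
  simp [List.filter_append, List.append_assoc]

lemma pvFoldl_buckets {α κ : Type} [LinearOrder κ] (key : α → κ) (is : List κ)
    (hs : is.Pairwise (· < ·)) (l : List α) (hl : ∀ x ∈ l, key x ∈ is) (p : List α) :
    l.foldl (fun acc x => PySem.List.insertBy (fun a b => decide (key a < key b)) x acc)
      (is.flatMap (fun i => p.filter (fun e => decide (key e = i)))) =
    is.flatMap (fun i => (p ++ l).filter (fun e => decide (key e = i))) := by
  induction l generalizing p with
  | nil => simp
  | cons x t ih =>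
    simp only [List.foldl_cons]
    rw [pvInsert_step key is hs x (hl x List.mem_cons_self) p,
      ih (fun y hy => hl y (List.mem_cons_of_mem _ hy)) (p ++ [x])]
    simp

-- the stable sort of a list whose keys all lie in the strictly increasing list `is`
-- is the concatenation of the key-buckets, each in original order
lemma pvSorted_buckets {α κ : Type} [LinearOrder κ] (key : α → κ) (is : List κ)
    (hs : is.Pairwise (· < ·)) (l : List α) (hl : ∀ x ∈ l, key x ∈ is) :
    PySem.List.sorted l key =
      is.flatMap (fun i => l.filter (fun e => decide (key e = i))) := by
  rw [PySem.List.sorted_eq_foldl_insertBy]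
  have h0 : (is.flatMap (fun i => ([] : List α).filter (fun e => decide (key e = i)))) = [] := by
    simp
  rw [← h0, pvFoldl_buckets key is hs l hl []]
  simp

-- with distinct keys, the bucket of one day is exactly A's dict lookup for that day
lemma pvBucket_std (l : List (String × String)) (hnd : (l.map Prod.fst).Nodup)
    (fmt : String × String → String) (s : String) :
    (l.filter (fun e => e.1 == s)).map fmt =
      (match PySem.Dict.get? (PySem.Dict.mk l) s with
       | some t => [fmt (s, t)]
       | none => []) := by
  induction l with
  | nil => simp [PySem.Dict.get?]
  | cons kv t ih =>
    simp only [List.map_cons, List.nodup_cons] at hnd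
    rw [List.filter_cons, PySem.Dict.get?_mk_cons]
    by_cases h : kv.1 = s
    · subst h
      simp only [BEq.rfl, if_true, List.map_cons]
      have : t.filter (fun e => e.1 == kv.1) = [] := by
        apply List.filter_eq_nil_iff.2
        intro e he hbe
        exact hnd.1 (List.mem_map.2 ⟨e, he, (eq_of_beq hbe)⟩)
      simp [this]
    · rw [if_neg (by simpa using h), if_neg (by simpa using h)]
      exact ih hnd.2

-- ===== VERDICT (by name: the statement is the Claim_ definition above) =====
theorem format_operating_hours_py_spec : Claim_equal_format_operating_hours_py := by
  intro hours _ hpre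
  unfold Spec_format_operating_hours_py
  unfold Pre_format_operating_hours_py at hpre
  cases hours with
  | none => rfl
  | some items =>
    simp only [Option.getD_some] at hpre
    unfold format_operating_hours_py format_operating_hours_py_alt
    cases hemp : items.isEmpty with
    | true => rw [List.isEmpty_iff] at hemp; subst hemp; rfl
    | false =>
      have hne : items ≠ [] := by simpa [List.isEmpty_iff] using hemp
      simp only [hemp, Bool.false_eq_true, if_false]
      -- A's first loop as a flatMap of per-day buckets
      have hbody1 : (fun (acc : List String) (day : String) =>
          match PySem.Dict.get? (PySem.Dict.mk items) day with
          | some t => acc ++ [pvFmtA (day, t)]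
          | none => acc)
          = fun acc day => acc ++ (items.filter (fun e => e.1 == day)).map pvFmtA := by
        funext acc day
        rw [pvBucket_std items hpre pvFmtA day]
        cases PySem.Dict.get? (PySem.Dict.mk items) day <;> simp
      rw [hbody1, PySem.List.foldl_append_eq_flatMap]
      -- A's second loop as an appended filter
      have hbody2 : (fun (acc : List String) (kv : String × String) =>
          if pvDaysA.contains kv.1 then acc else acc ++ [pvFmtA kv])
          = fun acc kv => if (!pvDaysA.contains kv.1) then acc ++ [pvFmtA kv] else acc := by
        funext acc kv; cases h : pvDaysA.contains kv.1 <;> simp [h]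
      rw [hbody2, PySem.List.foldl_append_if]
      -- B's key, named
      have hkey : (fun kv : String × String => PySem.Dict.getD pvRankB kv.1 ((pvDaysB.length : Int)))
          = fun kv : String × String => pvKeyB kv.1 := rfl
      rw [hkey]
      have hsne : PySem.List.sorted items (fun kv : String × String => pvKeyB kv.1) ≠ [] := by
        simp [PySem.List.sorted_eq_nil_iff, hne]
      -- identify the eight buckets with A's two passes
      have e0 := List.filter_congr (fun (x : String × String) (_ : x ∈ items) => pvKey_b0 x.1)
      have e1 := List.filter_congr (fun (x : String × String) (_ : x ∈ items) => pvKey_b1 x.1)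
      have e2 := List.filter_congr (fun (x : String × String) (_ : x ∈ items) => pvKey_b2 x.1)
      have e3 := List.filter_congr (fun (x : String × String) (_ : x ∈ items) => pvKey_b3 x.1)
      have e4 := List.filter_congr (fun (x : String × String) (_ : x ∈ items) => pvKey_b4 x.1)
      have e5 := List.filter_congr (fun (x : String × String) (_ : x ∈ items) => pvKey_b5 x.1)
      have e6 := List.filter_congr (fun (x : String × String) (_ : x ∈ items) => pvKey_b6 x.1)
      have e7 := List.filter_congr (fun (x : String × String) (_ : x ∈ items) => pvKey_b7 x.1)
      have hlines : ([] : List String) ++ pvDaysA.flatMap (fun day => (items.filter (fun e => e.1 == day)).map pvFmtA)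
          ++ (items.filter (fun kv => !pvDaysA.contains kv.1)).map pvFmtA
          = (PySem.List.sorted items (fun kv : String × String => pvKeyB kv.1)).map pvFmtB := by
        rw [pvSorted_buckets (fun kv : String × String => pvKeyB kv.1)
          ([0, 1, 2, 3, 4, 5, 6, 7] : List Int) (by decide) items (fun x _ => pvKey_mem x.1),
          List.map_flatMap, show pvFmtB = pvFmtA from rfl]
        simp only [List.flatMap_cons, List.flatMap_nil, List.append_nil, pvDaysA,
          e0, e1, e2, e3, e4, e5, e6, e7]
        simp [List.append_assoc]
      rw [hlines]
      simp [List.isEmpty_iff, hsne]
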